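-- pv_equiv track=rewrite | github.com/mukunda1518/Data-Structures-Algorithms | deque/change_to_uppercase.py | get_updated_word1
-- ===== SOURCE A (Python) =====
-- from collections import deque
--
-- def get_updated_word1(word):
--     dq = deque()
--     i = 0
--     n = len(word)
--     while i < n:
--         if word[i] != "@":
--             dq.append(word[i])
--             i += 1
--         else:
--             # count the no of '@'
--             freq = 0
--             while i < n and word[i] == "@":
--                 freq += 1
--                 i += 1
--             # store and update queue chars to upper case
--             temp = ""
--             while len(dq) > 0 and freq > 0:
--                 temp += dq.pop().upper()
--                 freq -= 1
--             for char in temp[::-1]: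
--                 dq.append(char)
--     return "".join(dq)
-- ===== SOURCE B (Python) =====
-- def get_updated_word1(word):
--     # Right-to-left scan keeping a counter of how many more letters must be
--     # uppercased, instead of a deque that is popped and rebuilt per '@' run.
--     res = []
--     cover = 0
--     run = 0
--     for c in reversed(word):
--         if c == '@':
--             run += 1
--             cover = max(cover, run)
--         else:
--             run = 0
--             if cover > 0:
--                 res.append(c.upper())
--                 cover -= 1
--             else:
--                 res.append(c)
--     return ''.join(reversed(res))
-- ===== Notes on version B (the rewrite author's own statement) =====
-- stated objective: faster
-- what changed: Replaces the left-to-right deque simulation (popping, uppercasing and re-pushing up to freq chars at every '@' run) by a single right-to-left pass that keeps only an integer counter of how many more letters must be uppercased.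
import Mathlib
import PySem

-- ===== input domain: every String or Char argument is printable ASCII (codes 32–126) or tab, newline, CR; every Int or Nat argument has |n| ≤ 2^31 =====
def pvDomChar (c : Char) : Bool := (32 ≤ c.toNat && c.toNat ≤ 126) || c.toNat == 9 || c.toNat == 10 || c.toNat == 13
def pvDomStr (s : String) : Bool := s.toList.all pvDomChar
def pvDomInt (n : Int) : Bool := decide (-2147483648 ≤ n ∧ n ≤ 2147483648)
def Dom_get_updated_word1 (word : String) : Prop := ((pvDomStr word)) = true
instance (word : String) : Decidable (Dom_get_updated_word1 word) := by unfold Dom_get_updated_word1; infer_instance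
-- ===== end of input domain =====

-- B replaces A's deque simulation by one right-to-left pass with an uppercase-budget counter.

-- ===== PORT A =====

-- inner loop `while i < n and word[i] == "@"`: count leading '@' and return the rest
def takeAts : List Char → Nat × List Char
  | [] => (0, [])
  | c :: rest =>
    if c = '@' then
      let p := takeAts rest
      (p.1 + 1, p.2)
    else (0, c :: rest)

theorem takeAts_len (l : List Char) : (takeAts l).2.length ≤ l.length := by
  induction l with
  | nil => simp [takeAts]
  | cons c rest ih =>
    by_cases h : c = '@' <;> simp [takeAts, h] <;> omega

-- inner loop `while len(dq) > 0 and freq > 0: temp += dq.pop().upper()`: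
-- returns (temp, remaining dq); dq.pop() pops from the right end
def popUpperA : List Char → Nat → List Char × List Char
  | dq, 0 => ([], dq)
  | dq, f + 1 =>
    match dq.getLast? with
    | none => ([], dq)
    | some last =>
      let p := popUpperA dq.dropLast f
      (last.toUpper :: p.1, p.2)

-- outer `while i < n` loop of A over the remaining characters, carrying the deque
def loopA (dq : List Char) (cs : List Char) : List Char :=
  match cs with
  | [] => dq
  | c :: rest =>
    if c ≠ '@' then loopA (dq ++ [c]) rest
    else
      let p := takeAts rest
      let freq := p.1 + 1
      let q := popUpperA dq freq
      -- `for char in temp[::-1]: dq.append(char)`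
      loopA (q.2 ++ q.1.reverse) p.2
termination_by cs.length
decreasing_by
  all_goals (have := takeAts_len rest; simp; try omega)

def get_updated_word1 (word : String) : String := String.mk (loopA [] word.toList)

-- ===== PORT B =====

-- loop body of B: state (res, cover, run)
def stepB (st : List Char × Nat × Nat) (c : Char) : List Char × Nat × Nat :=
  if c = '@' then (st.1, max st.2.1 (st.2.2 + 1), st.2.2 + 1)
  else if st.2.1 > 0 then (st.1 ++ [c.toUpper], st.2.1 - 1, 0)
  else (st.1 ++ [c], st.2.1, 0)

def get_updated_word1_alt (word : String) : String :=
  let st := word.toList.reverse.foldl stepB ([], 0, 0)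
  String.mk st.1.reverse

-- ===== PRECONDITION & SPEC =====
def Spec_get_updated_word1 (word : String) (out : String) : Prop := out = get_updated_word1_alt word
instance (word : String) (out : String) : Decidable (Spec_get_updated_word1 word out) := by unfold Spec_get_updated_word1; infer_instance

-- ===== CLAIM (what is proved, stated in full; the proofs are below) =====
def Claim_equal_get_updated_word1 : Prop := ∀ (word : String), Dom_get_updated_word1 word → Spec_get_updated_word1 word (get_updated_word1 word)

-- ===== LEMMAS AND PROOFS =====

-- uppercase the first k chars of a list
def upFirst (k : Nat) (l : List Char) : List Char := (l.take k).map Char.toUpper ++ l.drop k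

theorem toUpper_toUpper (c : Char) : c.toUpper.toUpper = c.toUpper := by
  have e1 : ('A'.val - 'a'.val).toNat = 4294967264 := by decide
  have e2 : ('a'.val).toNat = 97 := by decide
  have e3 : ('z'.val).toNat = 122 := by decide
  simp only [Char.toUpper]
  split
  · next h =>
    simp only [UInt32.le_iff_toNat_le, e2, e3] at h
    split
    · next h2 =>
      exfalso
      simp only [UInt32.le_iff_toNat_le, UInt32.toNat_add, e1, e2, e3] at h2
      omega
    · rfl
  · simp_all

theorem upFirst_nil (k : Nat) : upFirst k [] = [] := by simp [upFirst]

theorem upFirst_zero (l : List Char) : upFirst 0 l = l := by simp [upFirst]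

theorem upFirst_cons_succ (k : Nat) (c : Char) (l : List Char) :
    upFirst (k + 1) (c :: l) = c.toUpper :: upFirst k l := by simp [upFirst]

theorem upFirst_upFirst (a b : Nat) (l : List Char) :
    upFirst b (upFirst a l) = upFirst (max a b) l := by
  induction l generalizing a b with
  | nil => simp [upFirst_nil]
  | cons x xs ih =>
    cases a with
    | zero => simp [upFirst_zero]
    | succ a' =>
      cases b with
      | zero => simp [upFirst_zero, upFirst_cons_succ]
      | succ b' =>
        simp [upFirst_cons_succ, toUpper_toUpper, ih, Nat.succ_max_succ]

theorem popUpperA_concat (l : List Char) (c : Char) (f : Nat) :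
    popUpperA (l ++ [c]) (f + 1) = (c.toUpper :: (popUpperA l f).1, (popUpperA l f).2) := by
  simp [popUpperA, List.getLast?_concat, List.dropLast_concat]

theorem popUpperA_spec (f : Nat) (dq : List Char) :
    popUpperA dq f = ((dq.reverse.take f).map Char.toUpper, (dq.reverse.drop f).reverse) := by
  induction f generalizing dq with
  | zero => simp [popUpperA]
  | succ f ih =>
    rcases List.eq_nil_or_concat dq with rfl | ⟨l, c, rfl⟩
    · simp [popUpperA]
    · rw [List.concat_eq_append, popUpperA_concat, ih]
      simp

theorem foldl_stepB_replicate (f : Nat) (res : List Char) (cover run : Nat) (h : run ≤ cover) :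
    List.foldl stepB (res, cover, run) (List.replicate f '@') = (res, max cover (run + f), run + f) := by
  induction f generalizing cover run with
  | zero => simp [Nat.max_eq_left h]
  | succ f ih =>
    rw [List.replicate_succ, List.foldl_cons]
    have hstep : stepB (res, cover, run) '@' = (res, max cover (run + 1), run + 1) := by
      simp [stepB]
    rw [hstep, ih _ _ (Nat.le_max_right _ _)]
    have : max (max cover (run + 1)) (run + 1 + f) = max cover (run + (f + 1)) := by omega
    rw [this]
    ring_nf

theorem takeAts_decomp (l : List Char) :
    l = List.replicate (takeAts l).1 '@' ++ (takeAts l).2 ∧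
      ((takeAts l).2 = [] ∨ (takeAts l).2.head? ≠ some '@') := by
  induction l with
  | nil => simp [takeAts]
  | cons c rest ih =>
    by_cases h : c = '@'
    · obtain ⟨ih1, ih2⟩ := ih
      refine ⟨?_, by simpa [takeAts, h] using ih2⟩
      conv_lhs => rw [ih1]
      simp [takeAts, h, List.replicate_succ]
    · simp [takeAts, h]

theorem stepB_run_zero (st : List Char × Nat × Nat) (c : Char) (h : ¬ c = '@') :
    (stepB st c).2.2 = 0 := by
  simp only [stepB, if_neg h]
  split <;> rfl

theorem run_zero (l : List Char) (h : l = [] ∨ l.head? ≠ some '@') :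
    (List.foldl stepB ([], 0, 0) l.reverse).2.2 = 0 := by
  rcases h with rfl | h
  · rfl
  · cases l with
    | nil => rfl
    | cons a t =>
      simp only [List.head?_cons, ne_eq, Option.some.injEq] at h
      rw [List.reverse_cons, List.foldl_append, List.foldl_cons, List.foldl_nil]
      exact stepB_run_zero _ _ h

theorem loopA_eq (cs dq : List Char) :
    loopA dq cs =
      (upFirst (List.foldl stepB ([], 0, 0) cs.reverse).2.1 dq.reverse).reverse
        ++ (List.foldl stepB ([], 0, 0) cs.reverse).1.reverse := by
  induction dq, cs using loopA.induct with
  | case1 dq => simp [loopA, upFirst_zero]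
  | case2 dq c rest hne ih =>
    rw [loopA, if_pos hne, ih]
    rw [List.reverse_cons, List.foldl_append, List.foldl_cons, List.foldl_nil]
    rcases hS : List.foldl stepB ([], 0, 0) rest.reverse with ⟨res, cov, run⟩
    have hc : ¬ c = '@' := by simpa using hne
    cases cov with
    | zero => simp [stepB, hc, upFirst_zero]
    | succ k =>
      simp [stepB, hc, upFirst_cons_succ]
  | case3 dq c rest hne p freq q ih =>
    obtain ⟨hd, hside⟩ := takeAts_decomp rest
    have hq : q.2 ++ q.1.reverse = (upFirst freq dq.reverse).reverse := by
      show (popUpperA dq freq).2 ++ (popUpperA dq freq).1.reverse = _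
      rw [popUpperA_spec]
      simp [upFirst]
    rw [loopA, if_neg hne]
    rw [ih, hq, List.reverse_reverse, upFirst_upFirst]
    have hc : c = '@' := not_not.mp hne
    subst hc
    conv_rhs => rw [List.reverse_cons, hd]
    simp only [List.reverse_append, List.reverse_replicate, List.append_assoc]
    rw [show List.replicate p.1 '@' ++ ['@'] = List.replicate freq '@' from by
      rw [← List.replicate_succ']]
    rw [List.foldl_append]
    rcases hS : List.foldl stepB ([], 0, 0) p.2.reverse with ⟨res', cov', run'⟩
    have hrun : run' = 0 := by
      have h0 := run_zero p.2 hside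
      rw [hS] at h0
      exact h0
    subst hrun
    rw [foldl_stepB_replicate _ _ _ _ (Nat.zero_le _)]
    simp [Nat.max_comm]

-- ===== VERDICT (by name: the statement is the Claim_ definition above) =====
theorem get_updated_word1_spec : Claim_equal_get_updated_word1 := by
  intro word _
  unfold Spec_get_updated_word1 get_updated_word1 get_updated_word1_alt
  simp [loopA_eq, upFirst]
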